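-- pv_equiv track=rewrite | github.com/uzair114261/simple_portfolio | index.py | soluton
-- ===== SOURCE A (Python) =====
-- def soluton(n):
--     count = 0
--     for a in range(1,n+1):
--         for b in range(a+1, n+1):
--             for c in range(b+1, n+1):
--                 if (a+b)**2 == c**2:
--
--                     count += 1
--     return count
-- ===== SOURCE B (Python) =====
-- def soluton(n):
--     # triples a<b<c<=n with (a+b)^2 == c^2 are exactly a<b with a+b<=n:
--     # per c there are (c-1)//2 pairs; summing gives the closed form (n-1)^2//4
--     return 0 if n < 1 else (n - 1) ** 2 // 4
-- ===== Notes on version B (the rewrite author's own statement) =====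
-- stated objective: faster
-- what changed: replaced the triple nested loop that tests every triple with a single closed-form floor-division expression counting the pairs a<b with a+b<=n directly
import Mathlib
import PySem

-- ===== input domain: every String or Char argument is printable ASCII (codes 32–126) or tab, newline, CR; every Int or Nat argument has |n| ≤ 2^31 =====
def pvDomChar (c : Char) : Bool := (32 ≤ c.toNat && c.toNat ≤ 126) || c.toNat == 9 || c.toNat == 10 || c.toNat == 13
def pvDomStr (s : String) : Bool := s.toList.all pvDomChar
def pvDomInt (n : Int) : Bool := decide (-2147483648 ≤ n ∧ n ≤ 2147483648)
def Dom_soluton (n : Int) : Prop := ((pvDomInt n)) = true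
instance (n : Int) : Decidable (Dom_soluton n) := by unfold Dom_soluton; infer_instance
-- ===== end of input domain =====

-- B replaces A's triple loop with a closed-form floor-division expression.

-- ===== PORT A =====
def soluton (n : Int) : Int :=
  (PySem.List.pyRange 1 (n+1) 1).foldl (fun count a =>
    (PySem.List.pyRange (a+1) (n+1) 1).foldl (fun count b =>
      (PySem.List.pyRange (b+1) (n+1) 1).foldl (fun count c =>
        if (a+b)^2 = c^2 then count + 1 else count) count) count) 0

-- ===== PORT B =====
def soluton_alt (n : Int) : Int :=
  if n < 1 then 0 else PySem.Int.floordiv ((n-1)^2) 4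

-- ===== PRECONDITION & SPEC =====
def Spec_soluton (n : Int) (out : Int) : Prop := out = soluton_alt n
instance (n : Int) (out : Int) : Decidable (Spec_soluton n out) := by unfold Spec_soluton; infer_instance

-- ===== CLAIM (what is proved, stated in full; the proofs are below) =====
def Claim_equal_soluton : Prop := ∀ (n : Int), Dom_soluton n → Spec_soluton n (soluton n)

-- ===== LEMMAS AND PROOFS =====

-- number of elements equal to v in range(lo, hi)
lemma countP_range_eq (lo hi v : Int) :
    (PySem.List.pyRange lo hi 1).countP (fun x => decide (x = v))
      = if lo ≤ v ∧ v < hi then 1 else 0 := by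
  by_cases h : hi ≤ lo
  · rw [PySem.List.pyRange_one_eq_nil h]
    simp
    omega
  · rw [PySem.List.pyRange_one_cons (by omega), List.countP_cons, countP_range_eq (lo+1) hi v]
    by_cases hv : lo = v <;> simp [hv] <;> (try split_ifs) <;> omega
termination_by (hi - lo).toNat
decreasing_by all_goals omega

-- number of elements ≤ m in range(lo, hi)
lemma countP_range_le (lo hi m : Int) :
    (((PySem.List.pyRange lo hi 1).countP (fun x => decide (x ≤ m)) : Nat) : Int)
      = max 0 (min hi (m+1) - lo) := by
  by_cases h : hi ≤ lo
  · rw [PySem.List.pyRange_one_eq_nil h]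
    simp
    omega
  · rw [PySem.List.pyRange_one_cons (by omega), List.countP_cons]
    by_cases hv : lo ≤ m <;> simp [hv] <;> push_cast [countP_range_le (lo+1) hi m] <;> omega
termination_by (hi - lo).toNat
decreasing_by all_goals omega

-- innermost loop of A: counts the single c = a+b when it lies in (b, n]
lemma inner_eq (n a b cnt : Int) (ha : 1 ≤ a) (hb : a < b) :
    (PySem.List.pyRange (b+1) (n+1) 1).foldl
      (fun count c => if (a+b)^2 = c^2 then count + 1 else count) cnt
    = if a + b ≤ n then cnt + 1 else cnt := by
  rw [PySem.List.foldl_ite_add_one (fun c => (a+b)^2 = c^2)]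
  have hc : (PySem.List.pyRange (b+1) (n+1) 1).countP (fun c => decide ((a+b)^2 = c^2))
      = (PySem.List.pyRange (b+1) (n+1) 1).countP (fun c => decide (c = a+b)) := by
    apply List.countP_congr
    intro c hcmem
    rw [PySem.List.mem_pyRange_one] at hcmem
    simp only [decide_eq_true_eq]
    constructor
    · intro h
      have h2 : (a+b-c)*(a+b+c) = 0 := by linear_combination h
      rcases mul_eq_zero.mp h2 with h3 | h3 <;> omega
    · intro h
      rw [h]
  rw [hc, countP_range_eq]
  split_ifs <;> simp_all <;> omega

-- middle loop of A: counts b with a < b and a + b ≤ n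
lemma middle_eq (n a cnt : Int) (ha : 1 ≤ a) :
    (PySem.List.pyRange (a+1) (n+1) 1).foldl
      (fun count b => (PySem.List.pyRange (b+1) (n+1) 1).foldl
        (fun count c => if (a+b)^2 = c^2 then count + 1 else count) count) cnt
    = cnt + max 0 (n - 2*a) := by
  rw [PySem.List.foldl_congr_mem _ _ (fun count b => if a + b ≤ n then count + 1 else count)]
  · rw [PySem.List.foldl_ite_add_one (fun b => a + b ≤ n)]
    have hc : (PySem.List.pyRange (a+1) (n+1) 1).countP (fun b => decide (a + b ≤ n))
        = (PySem.List.pyRange (a+1) (n+1) 1).countP (fun b => decide (b ≤ n - a)) := by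
      apply List.countP_congr
      intro b _
      simp only [decide_eq_true_eq]
      omega
    rw [hc, countP_range_le]
    omega
  · intro acc b hb
    rw [PySem.List.mem_pyRange_one] at hb
    exact inner_eq n a b acc ha (by omega)

-- A as a sum over a of max 0 (n - 2a)
lemma soluton_eq_sum (n : Int) :
    soluton n = ((PySem.List.pyRange 1 (n+1) 1).map (fun a => max 0 (n - 2*a))).sum := by
  unfold soluton
  rw [PySem.List.foldl_congr_mem _ _ (fun count a => count + max 0 (n - 2*a))]
  · rw [PySem.List.foldl_add]
    simp
  · intro acc a haa
    rw [PySem.List.mem_pyRange_one] at haa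
    exact middle_eq n a acc (by omega)

def sumG (b : Int) (j : Nat) : Int :=
  ((List.range j).map (fun (k : Nat) => max 0 (b - 2*(k:Int)))).sum

lemma sumG_succ_top (b : Int) (j : Nat) :
    sumG b (j+1) = sumG b j + max 0 (b - 2*(j:Int)) := by
  unfold sumG
  rw [List.range_succ]
  simp

lemma sumG_shift (b : Int) (j : Nat) :
    sumG (b+2) (j+1) = max 0 (b+2) + sumG b j := by
  unfold sumG
  rw [List.range_succ_eq_map]
  simp only [List.map_cons, List.map_map, List.sum_cons]
  congr 1
  · norm_num
  · apply congrArg List.sum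
    apply List.map_congr_left
    intro k _
    simp only [Function.comp]
    congr 1
    push_cast
    ring

lemma sumG_closed (m : Nat) : sumG ((m:Int) - 2) m = ((m:Int)-1)^2 / 4 := by
  induction m using Nat.twoStepInduction with
  | zero => decide
  | one => decide
  | more m ih _ =>
    have h1 : ((m:Int) + 2 - 2) = ((m:Int) - 2) + 2 := by ring
    have h2 : (((m+2 : Nat)):Int) - 2 = ((m:Int) - 2) + 2 := by push_cast; ring
    rw [h2]
    show sumG (((m:Int) - 2) + 2) (m + 1 + 1) = _
    rw [sumG_shift, sumG_succ_top, ih]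
    have h0 : max 0 (((m:Int) - 2) - 2*(m:Int)) = 0 := by omega
    have hm : max 0 (((m:Int) - 2) + 2) = (m:Int) := by omega
    rw [h0, hm]
    have h4 : (((m+2 : Nat)):Int) - 1 = ((m:Int) - 1) + 2 := by push_cast; ring
    rw [h4]
    have h5 : (((m:Int) - 1) + 2)^2 = ((m:Int)-1)^2 + (m:Int) * 4 := by ring
    rw [h5, Int.add_mul_ediv_right _ _ (by norm_num)]
    ring

-- ===== VERDICT (by name: the statement is the Claim_ definition above) =====
theorem soluton_spec : Claim_equal_soluton := by
  intro n _
  unfold Spec_soluton soluton_alt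
  by_cases hn : n < 1
  · rw [if_pos hn]
    unfold soluton
    rw [PySem.List.pyRange_one_eq_nil (by omega)]
    rfl
  · rw [if_neg hn]
    obtain ⟨m, rfl⟩ : ∃ m : Nat, n = (m : Int) :=
      ⟨n.toNat, (Int.toNat_of_nonneg (by omega)).symm⟩
    rw [PySem.Int.floordiv_eq_ediv_of_pos (by norm_num), soluton_eq_sum,
      PySem.List.pyRange_one, List.map_map, ← sumG_closed m]
    unfold sumG
    have hlen : ((m:Int) + 1 - 1).toNat = m := by omega
    rw [hlen]
    apply congrArg List.sum
    apply List.map_congr_left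
    intro k _
    simp only [Function.comp]
    congr 1
    ring
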